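-- pv_equiv track=rewrite | github.com/Rzy6934/Football-Match-Predictor | process_data.py | get_5_wins_losses_streaks
-- ===== SOURCE A (Python) =====
-- def get_5_wins_losses_streaks(all_teams_5g_streaks):
--     all_teams_5_wins_streaks = []
--     all_teams_5_losses_streaks = []
--     team_5_wins_streaks = []
--     team_5_losses_streaks = []
--     five_wins_streaks = 0
--     five_losses_streaks = 0
--
--     for team_5g_streaks in all_teams_5g_streaks:
--         for streak in team_5g_streaks:
--             if streak == "WWWWW":
--                 five_wins_streaks += 1
--             elif streak == "LLLLL":
--                 five_losses_streaks += 1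
--             team_5_wins_streaks.append(five_wins_streaks)
--             team_5_losses_streaks.append(five_losses_streaks)
--
--         all_teams_5_wins_streaks.append(team_5_wins_streaks)
--         all_teams_5_losses_streaks.append(team_5_losses_streaks)
--         team_5_wins_streaks = []
--         team_5_losses_streaks = []
--         five_wins_streaks = 0
--         five_losses_streaks = 0
--
--     return all_teams_5_wins_streaks, all_teams_5_losses_streaks
-- ===== SOURCE B (Python) =====
-- def _accumulate(xs):
--     totals = []
--     running = 0
--     for x in xs:
--         running += x
--         totals.append(running)
--     return totals
--
--
-- def get_5_wins_losses_streaks(all_teams_5g_streaks):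
--     wins = [_accumulate([1 if s == "WWWWW" else 0 for s in team])
--             for team in all_teams_5g_streaks]
--     losses = [_accumulate([1 if s == "LLLLL" else 0 for s in team])
--               for team in all_teams_5g_streaks]
--     return wins, losses
-- ===== Notes on version B (the rewrite author's own statement) =====
-- stated objective: simpler
-- what changed: Replaces the single fused loop threading four mutable lists and two counters (reset after each team) with per-team indicator lists followed by a shared prefix-sum helper, built by two comprehensions.
import Mathlib
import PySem

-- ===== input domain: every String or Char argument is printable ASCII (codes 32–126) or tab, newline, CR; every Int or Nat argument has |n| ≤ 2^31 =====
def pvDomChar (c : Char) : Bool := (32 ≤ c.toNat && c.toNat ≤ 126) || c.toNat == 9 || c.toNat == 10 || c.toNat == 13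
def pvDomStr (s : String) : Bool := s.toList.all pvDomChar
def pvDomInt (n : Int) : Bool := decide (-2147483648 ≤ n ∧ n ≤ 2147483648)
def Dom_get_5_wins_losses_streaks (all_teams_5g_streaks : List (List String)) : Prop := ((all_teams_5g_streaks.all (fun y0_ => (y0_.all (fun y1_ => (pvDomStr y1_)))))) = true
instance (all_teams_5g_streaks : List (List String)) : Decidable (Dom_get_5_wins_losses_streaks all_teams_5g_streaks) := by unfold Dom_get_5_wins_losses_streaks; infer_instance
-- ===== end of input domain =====

-- B replaces A's fused loop (two counters reset per team) by per-team indicator lists plus a prefix-sum helper: simpler decomposition, same cost.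

-- ===== PORT A =====
-- inner loop body: state = (team_5_wins_streaks, team_5_losses_streaks, five_wins_streaks, five_losses_streaks)
def pvStepA (st : List Int × List Int × Int × Int) (streak : String) : List Int × List Int × Int × Int :=
  let tw := st.1; let tl := st.2.1; let fw := st.2.2.1; let fl := st.2.2.2
  let fw := if streak = "WWWWW" then fw + 1 else fw
  let fl := if streak ≠ "WWWWW" ∧ streak = "LLLLL" then fl + 1 else fl
  (tw ++ [fw], tl ++ [fl], fw, fl)

-- outer loop body: state = (all_teams_5_wins, all_teams_5_losses, team lists and counters, reset at the end)
def pvOuterA (st : List (List Int) × List (List Int) × List Int × List Int × Int × Int)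
    (team : List String) : List (List Int) × List (List Int) × List Int × List Int × Int × Int :=
  let r := team.foldl pvStepA (st.2.2.1, st.2.2.2.1, st.2.2.2.2.1, st.2.2.2.2.2)
  (st.1 ++ [r.1], st.2.1 ++ [r.2.1], [], [], 0, 0)

def get_5_wins_losses_streaks (all_teams_5g_streaks : List (List String)) : List (List Int) × List (List Int) :=
  let fin := all_teams_5g_streaks.foldl pvOuterA ([], [], [], [], 0, 0)
  (fin.1, fin.2.1)

-- ===== PORT B =====
def pvAccumulate (xs : List Int) : List Int :=
  (xs.foldl (fun (st : List Int × Int) x => (st.1 ++ [st.2 + x], st.2 + x)) ([], 0)).1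

def get_5_wins_losses_streaks_alt (all_teams_5g_streaks : List (List String)) : List (List Int) × List (List Int) :=
  (all_teams_5g_streaks.map (fun team => pvAccumulate (team.map (fun s => if s = "WWWWW" then 1 else 0))),
   all_teams_5g_streaks.map (fun team => pvAccumulate (team.map (fun s => if s = "LLLLL" then 1 else 0))))

-- ===== PRECONDITION & SPEC =====
def Spec_get_5_wins_losses_streaks (all_teams_5g_streaks : List (List String)) (out : List (List Int) × List (List Int)) : Prop := out = get_5_wins_losses_streaks_alt all_teams_5g_streaks
instance (all_teams_5g_streaks : List (List String)) (out : List (List Int) × List (List Int)) : Decidable (Spec_get_5_wins_losses_streaks all_teams_5g_streaks out) := by unfold Spec_get_5_wins_losses_streaks; infer_instance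

-- ===== CLAIM (what is proved, stated in full; the proofs are below) =====
def Claim_equal_get_5_wins_losses_streaks : Prop := ∀ (all_teams_5g_streaks : List (List String)), Dom_get_5_wins_losses_streaks all_teams_5g_streaks → Spec_get_5_wins_losses_streaks all_teams_5g_streaks (get_5_wins_losses_streaks all_teams_5g_streaks)

-- ===== LEMMAS AND PROOFS =====

-- prefix sums starting from c
def pvAccFrom (c : Int) : List Int → List Int
  | [] => []
  | x :: xs => (c + x) :: pvAccFrom (c + x) xs

theorem pvAccumulate_foldl (xs : List Int) (acc : List Int) (c : Int) :
    (xs.foldl (fun (st : List Int × Int) x => (st.1 ++ [st.2 + x], st.2 + x)) (acc, c)).1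
      = acc ++ pvAccFrom c xs := by
  induction xs generalizing acc c with
  | nil => simp [pvAccFrom]
  | cons x xs ih => simp [pvAccFrom, ih]

theorem pvInner_eq (team : List String) (tw tl : List Int) (fw fl : Int) :
    team.foldl pvStepA (tw, tl, fw, fl)
      = (tw ++ pvAccFrom fw (team.map (fun s => if s = "WWWWW" then 1 else 0)),
         tl ++ pvAccFrom fl (team.map (fun s => if s = "LLLLL" then 1 else 0)),
         (team.map (fun s => if s = "WWWWW" then 1 else 0)).foldl (· + ·) fw,
         (team.map (fun s => if s = "LLLLL" then 1 else 0)).foldl (· + ·) fl) := by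
  induction team generalizing tw tl fw fl with
  | nil => simp [pvAccFrom]
  | cons s team ih =>
    by_cases hw : s = "WWWWW"
    · simp [pvStepA, hw, ih, pvAccFrom]
    · by_cases hl : s = "LLLLL"
      · simp [pvStepA, hl, ih, pvAccFrom]
      · simp [pvStepA, hw, hl, ih, pvAccFrom]

theorem pvOuter_eq (ts : List (List String)) (aW aL : List (List Int)) :
    ts.foldl pvOuterA (aW, aL, [], [], 0, 0)
      = (aW ++ ts.map (fun team => pvAccFrom 0 (team.map (fun s => if s = "WWWWW" then 1 else 0))),
         aL ++ ts.map (fun team => pvAccFrom 0 (team.map (fun s => if s = "LLLLL" then 1 else 0))),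
         [], [], 0, 0) := by
  induction ts generalizing aW aL with
  | nil => simp
  | cons team ts ih => simp [pvOuterA, pvInner_eq, ih]

-- ===== VERDICT (by name: the statement is the Claim_ definition above) =====
theorem get_5_wins_losses_streaks_spec : Claim_equal_get_5_wins_losses_streaks := by
  intro ts _
  show get_5_wins_losses_streaks ts = get_5_wins_losses_streaks_alt ts
  simp [get_5_wins_losses_streaks, get_5_wins_losses_streaks_alt, pvOuter_eq,
        pvAccumulate, pvAccumulate_foldl]
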